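-- pv_equiv track=rewrite | github.com/KumarAmbuj/gfg_hashing | 43.product pair.py | productpair
-- ===== SOURCE A (Python) =====
-- def productpair(arr):
--     s=set()
--
--     for x in arr:
--         s.add(x)
--
--     result=0
--
--     for i in range(len(arr)-1):
--         for j in range(i+1,len(arr)):
--
--             if arr[i]*arr[j] in s:
--                 result+=1
--
--     return result
-- ===== SOURCE B (Python) =====
-- def productpair(arr):
--     freq = {}
--     for x in arr:
--         freq[x] = freq.get(x, 0) + 1
--     vals = list(freq)
--     total = 0
--     while vals:
--         u = vals[0]
--         vals = vals[1:]
--         fu = freq[u]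
--         if u * u in freq:
--             total += fu * (fu - 1) // 2
--         for v in vals:
--             if u * v in freq:
--                 total += fu * freq[v]
--     return total
-- ===== Notes on version B (the rewrite author's own statement) =====
-- stated objective: alternative
-- what changed: A scans all O(n^2) index pairs; B builds a frequency dict once and sums fu*fv (plus fu*(fu-1)//2 on the diagonal) over pairs of distinct values whose product is a key, so it costs O(n + d^2) in the number d of distinct values (much faster on duplicate-heavy input, same order when all values are distinct).
import Mathlib
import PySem

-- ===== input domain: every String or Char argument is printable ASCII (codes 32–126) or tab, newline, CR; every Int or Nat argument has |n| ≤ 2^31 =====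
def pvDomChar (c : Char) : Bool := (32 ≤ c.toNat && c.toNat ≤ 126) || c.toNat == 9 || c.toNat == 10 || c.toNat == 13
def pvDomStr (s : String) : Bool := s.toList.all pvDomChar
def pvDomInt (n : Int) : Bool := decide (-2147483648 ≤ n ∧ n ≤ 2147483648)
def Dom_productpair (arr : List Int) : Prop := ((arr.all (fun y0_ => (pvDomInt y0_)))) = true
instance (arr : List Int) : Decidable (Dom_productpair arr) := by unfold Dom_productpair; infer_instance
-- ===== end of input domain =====

-- B replaces A's scan over all index pairs by a scan over pairs of the d distinct values
-- with their multiplicities (frequency dict): O(n + d^2) instead of O(n^2).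

-- ===== PORT A =====
def productpair (arr : List Int) : Int :=
  let s := arr.foldl PySem.Set.add PySem.Set.empty
  (PySem.List.pyRange 0 (PySem.List.len arr - 1)).foldl (fun result i =>
    (PySem.List.pyRange (i + 1) (PySem.List.len arr)).foldl (fun result j =>
      if PySem.Set.contains s (PySem.List.pyGetD arr i 0 * PySem.List.pyGetD arr j 0)
      then result + 1 else result) result) 0

-- ===== PORT B =====
-- 'for v in vals: if u*v in freq: total += fu * freq[v]'
def pvAltInner (freq : PySem.Dict Int Int) (u fu : Int) (vals : List Int) (total : Int) : Int :=
  vals.foldl (fun t v => if freq.contains (u * v) then t + fu * freq.getD v 0 else t) total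

-- 'while vals: u = vals[0]; vals = vals[1:]; …'
def pvAltLoop (freq : PySem.Dict Int Int) : List Int → Int → Int
  | [], total => total
  | u :: vals, total =>
    let fu := freq.getD u 0
    let total := if freq.contains (u * u) then total + PySem.Int.floordiv (fu * (fu - 1)) 2 else total
    let total := pvAltInner freq u fu vals total
    pvAltLoop freq vals total

def productpair_alt (arr : List Int) : Int :=
  let freq := arr.foldl (fun d x => d.insert x (d.getD x 0 + 1)) PySem.Dict.empty
  pvAltLoop freq freq.keys 0

-- ===== PRECONDITION & SPEC =====
def Spec_productpair (arr : List Int) (out : Int) : Prop := out = productpair_alt arr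
instance (arr : List Int) (out : Int) : Decidable (Spec_productpair arr out) := by unfold Spec_productpair; infer_instance

-- ===== CLAIM (what is proved, stated in full; the proofs are below) =====
def Claim_equal_productpair : Prop := ∀ (arr : List Int), Dom_productpair arr → Spec_productpair arr (productpair arr)

-- ===== LEMMAS AND PROOFS =====

def pvCountPairs (p : Int → Int → Bool) : List Int → Int
  | [] => 0
  | x :: xs => (xs.countP (p x) : Int) + pvCountPairs p xs

lemma pvCountPairs_perm (p : Int → Int → Bool) (hsym : ∀ x y, p x y = p y x)
    {l₁ l₂ : List Int} (h : l₁.Perm l₂) : pvCountPairs p l₁ = pvCountPairs p l₂ := by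
  induction h with
  | nil => rfl
  | cons x h ih => simp [pvCountPairs, ih, h.countP_eq]
  | swap x y t => simp [pvCountPairs, List.countP_cons, hsym x y]; ring
  | trans h1 h2 ih1 ih2 => omega

lemma pvCountPairs_append (p : Int → Int → Bool) (as bs : List Int) :
    pvCountPairs p (as ++ bs) =
      pvCountPairs p as + (as.map (fun x => ((bs.countP (p x) : Nat) : Int))).sum + pvCountPairs p bs := by
  induction as with
  | nil => simp [pvCountPairs]
  | cons x xs ih => simp [pvCountPairs, List.countP_append, ih]; ring

lemma pvCountPairs_replicate (p : Int → Int → Bool) (k : Nat) (u : Int) :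
    pvCountPairs p (List.replicate k u) = if p u u then ((k.choose 2 : Nat) : Int) else 0 := by
  induction k with
  | zero => simp [pvCountPairs]
  | succ k ih =>
    rw [List.replicate_succ]
    simp only [pvCountPairs, ih, List.countP_replicate]
    rcases h : p u u with _ | _ <;> simp [Nat.choose_succ_succ]

lemma pvChooseTwo (k : Nat) :
    PySem.Int.floordiv ((k : Int) * ((k : Int) - 1)) 2 = ((k.choose 2 : Nat) : Int) := by
  have h1 : ((k : Int) * ((k : Int) - 1)) = ((k * (k - 1) : Nat) : Int) := by
    cases k
    · simp
    · push_cast; ring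
  rw [h1, show ((2:Int)) = ((2:Nat):Int) by norm_num, PySem.Int.floordiv_natCast]
  norm_num [Nat.choose_two_right]


lemma pvFoldlAddMem (x : Int) : ∀ (ys : List Int) (s : PySem.Set Int), x ∈ s →
    ys.foldl PySem.Set.add s = (ys.filter (fun y => !(y == x))).foldl PySem.Set.add s := by
  intro ys
  induction ys with
  | nil => intro s _; rfl
  | cons y ys ih =>
    intro s hx
    by_cases hy : (y == x) = true
    · have : PySem.Set.add s y = s := by
        have : y ∈ s := by rw [eq_of_beq hy]; exact hx
        simp [PySem.Set.add, PySem.Set.contains, this]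
      simp only [List.foldl_cons, List.filter_cons, hy, Bool.not_true, this]
      exact ih s hx
    · simp only [List.foldl_cons, List.filter_cons, eq_false_of_ne_true hy, Bool.not_false]
      exact ih _ ((PySem.Set.mem_add s y x).mpr (Or.inl hx))

lemma pvFoldlAddCons (x : Int) : ∀ (ys : List Int) (s : PySem.Set Int),
    (∀ y ∈ ys, (y == x) = false) →
    ys.foldl PySem.Set.add (x :: s) = x :: ys.foldl PySem.Set.add s := by
  intro ys
  induction ys with
  | nil => intro s _; rfl
  | cons y ys ih =>
    intro s h
    have hyx : (y == x) = false := h y (List.mem_cons_self)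
    have hne : y ≠ x := by simpa using hyx
    have hc : PySem.Set.add (x :: s) y = x :: PySem.Set.add s y := by
      simp only [PySem.Set.add, PySem.Set.contains, List.contains_cons, hyx, Bool.false_or]
      split <;> rfl
    simp only [List.foldl_cons, hc]
    exact ih _ (fun z hz => h z (List.mem_cons_of_mem _ hz))

lemma pvOfListCons (x : Int) (xs : List Int) :
    PySem.Set.ofList (x :: xs) = x :: PySem.Set.ofList (xs.filter (fun y => !(y == x))) := by
  rw [PySem.Set.ofList_eq_foldl, PySem.Set.ofList_eq_foldl]
  have h0 : PySem.Set.add [] x = [x] := rfl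
  rw [List.foldl_cons, h0]
  rw [pvFoldlAddMem x xs [x] (List.mem_singleton_self x)]
  have : ([x] : PySem.Set Int) = x :: [] := rfl
  rw [this, pvFoldlAddCons x _ []]
  intro y hy
  simpa using (List.of_mem_filter hy)

lemma pvCountPByValues : ∀ (n : Nat) (l : List Int), l.length ≤ n → ∀ (q : Int → Bool),
    ((PySem.Set.ofList l).map (fun v => if q v then ((l.count v : Nat) : Int) else 0)).sum
      = ((l.countP q : Nat) : Int) := by
  intro n
  induction n with
  | zero => intro l hl q; rw [List.length_eq_zero_iff.mp (Nat.le_zero.mp hl)]; rfl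
  | succ n ih =>
    intro l hl q
    match l with
    | [] => rfl
    | x :: xs =>
      set m := xs.filter (fun y => !(y == x)) with hm
      have hml : m.length ≤ n := by
        have h2 : m.length ≤ xs.length := by rw [hm]; exact List.length_filter_le _ xs
        simp at hl; omega
      have hcnt : ∀ v ∈ PySem.Set.ofList m, (x :: xs).count v = m.count v := by
        intro v hv
        have hvm : v ∈ m := (PySem.Set.mem_ofList m v).mp hv
        have hne : (v == x) = false := by
          have := List.of_mem_filter hvm
          simpa using this
        have hnex : v ≠ x := by simpa using hne
        have h1 : (x :: xs).count v = xs.count v := by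
          simp [Ne.symm hnex]
        rw [h1, hm, List.count_filter (by simpa using hne)]
      rw [pvOfListCons]
      simp only [List.map_cons, List.sum_cons]
      have hmap : (PySem.Set.ofList m).map (fun v => if q v then (((x :: xs).count v : Nat) : Int) else 0)
          = (PySem.Set.ofList m).map (fun v => if q v then ((m.count v : Nat) : Int) else 0) := by
        apply List.map_congr_left
        intro v hv
        rw [hcnt v hv]
      rw [← hm, hmap, ih m hml q]
      -- remains: head term + countP q m = countP q (x::xs)
      have hsplit : xs.countP q = (if q x then xs.count x else 0) + m.countP q := by
        have hperm : (xs.filter (fun y => y == x) ++ xs.filter (fun y => !(y == x))).Perm xs :=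
          List.filter_append_perm _ xs
        have := (hperm.countP_eq q).symm
        rw [this, List.countP_append, List.filter_beq, List.countP_replicate, hm]
      rw [List.count_cons_self, List.countP_cons, hsplit]
      rcases hq : q x with _ | _
      · simp
      · simp
        ring

lemma pvFoldlIfAdd (c : Int → Bool) (g : Int → Int) (l : List Int) (a : Int) :
    l.foldl (fun t v => if c v then t + g v else t) a
      = a + (l.map (fun v => if c v then g v else 0)).sum := by
  have h := PySem.List.foldl_congr_mem (l := l) (init := a)
    (f := fun t v => if c v then t + g v else t)
    (g := fun t v => t + (if c v then g v else 0))
    (by intro acc v _; beta_reduce; split <;> simp)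
  rw [h, PySem.List.foldl_add]

lemma pvMainLoop : ∀ (n : Nat) (l : List Int), l.length ≤ n →
    ∀ (freq : PySem.Dict Int Int) (S : Int → Bool) (t : Int),
    (∀ w, freq.contains w = S w) →
    (∀ v ∈ PySem.Set.ofList l, freq.getD v 0 = ((l.count v : Nat) : Int)) →
    pvAltLoop freq (PySem.Set.ofList l) t = t + pvCountPairs (fun x y => S (x * y)) l := by
  intro n
  induction n with
  | zero =>
    intro l hl freq S t _ _
    rw [List.length_eq_zero_iff.mp (Nat.le_zero.mp hl)]
    simp [pvAltLoop, pvCountPairs, PySem.Set.ofList]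
  | succ n ih =>
    intro l hl freq S t h1 h2
    match l with
    | [] => simp [pvAltLoop, pvCountPairs, PySem.Set.ofList]
    | x :: xs =>
      have hsym : ∀ a b, S (a * b) = S (b * a) := by intro a b; rw [mul_comm]
      set m := xs.filter (fun y => !(y == x)) with hm
      set k := (x :: xs).count x with hk
      have hml : m.length ≤ n := by
        have hle : m.length ≤ xs.length := by rw [hm]; exact List.length_filter_le _ xs
        simp at hl; omega
      -- counts agree on m
      have hmem : ∀ v ∈ PySem.Set.ofList m, v ∈ PySem.Set.ofList (x :: xs) := by
        intro v hv
        rw [PySem.Set.mem_ofList] at hv ⊢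
        exact List.mem_cons_of_mem _ (List.mem_of_mem_filter hv)
      have hcnt : ∀ v ∈ PySem.Set.ofList m, (x :: xs).count v = m.count v := by
        intro v hv
        have hvm : v ∈ m := (PySem.Set.mem_ofList m v).mp hv
        have hne : (v == x) = false := by simpa using List.of_mem_filter hvm
        have hnex : v ≠ x := by simpa using hne
        have hh : (x :: xs).count v = xs.count v := by simp [Ne.symm hnex]
        rw [hh, hm, List.count_filter (by simpa using hne)]
      have h2' : ∀ v ∈ PySem.Set.ofList m, freq.getD v 0 = ((m.count v : Nat) : Int) := by
        intro v hv; rw [h2 v (hmem v hv), hcnt v hv]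
      have hfu : freq.getD x 0 = (k : Int) :=
        h2 x (by rw [PySem.Set.mem_ofList]; exact List.mem_cons_self)
      have ht1 : (if freq.contains (x * x) then t + PySem.Int.floordiv (freq.getD x 0 * (freq.getD x 0 - 1)) 2 else t)
          = t + (if S (x * x) then ((k.choose 2 : Nat) : Int) else 0) := by
        rw [h1, hfu, pvChooseTwo]; split <;> simp
      have hmap : (PySem.Set.ofList m).map
            (fun v => if freq.contains (x * v) then freq.getD x 0 * freq.getD v 0 else 0)
          = (PySem.Set.ofList m).map (fun v => (k : Int) * (if S (x * v) then ((m.count v : Nat) : Int) else 0)) := by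
        apply List.map_congr_left
        intro v hv
        rw [h1, hfu, h2' v hv]
        split <;> simp
      have hsum : ((PySem.Set.ofList m).map
            (fun v => if freq.contains (x * v) then freq.getD x 0 * freq.getD v 0 else 0)).sum
          = (k : Int) * ((m.countP (fun y => S (x * y)) : Nat) : Int) := by
        rw [hmap, List.sum_map_mul_left, pvCountPByValues m.length m le_rfl (fun y => S (x * y))]
      have hinner : ∀ t' : Int, pvAltInner freq x (freq.getD x 0) (PySem.Set.ofList m) t'
          = t' + (k : Int) * ((m.countP (fun y => S (x * y)) : Nat) : Int) := by
        intro t'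
        rw [pvAltInner, pvFoldlIfAdd, hsum]
      -- left side
      rw [pvOfListCons, ← hm]
      simp only [pvAltLoop]
      rw [hinner, ht1, ih m hml freq S _ h1 h2']
      -- right side
      have hfilter2 : (x :: xs).filter (fun y => !(y == x)) = m := by
        rw [hm, List.filter_cons]; simp
      have hfilter1 : (x :: xs).filter (fun y => y == x) = List.replicate k x := by
        rw [hk]; exact List.filter_beq x
      have hperm : (List.replicate k x ++ m).Perm (x :: xs) := by
        rw [← hfilter1, ← hfilter2]; exact List.filter_append_perm _ _
      rw [← pvCountPairs_perm (fun a b => S (a * b)) hsym hperm,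
          pvCountPairs_append, pvCountPairs_replicate]
      rw [List.map_replicate, List.sum_replicate, nsmul_eq_mul]
      ring

lemma pvRangeSum (S : Int → Bool) : ∀ (l : List Int),
    ((List.range l.length).map (fun i =>
        (((l.drop (i + 1)).countP (fun y => S (l.getD i 0 * y)) : Nat) : Int))).sum
      = pvCountPairs (fun x y => S (x * y)) l := by
  intro l
  induction l with
  | nil => rfl
  | cons x xs ih =>
    rw [List.length_cons, List.range_succ_eq_map]
    simp only [List.map_cons, List.sum_cons, List.map_map]
    rw [pvCountPairs, ← ih]
    congr 1

lemma pvA_eq (arr : List Int) :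
    productpair arr = pvCountPairs (fun x y => arr.contains (x * y)) arr := by
  match arr with
  | [] => rfl
  | a0 :: rest =>
    set arr := a0 :: rest with harr
    have hne : arr.length = (arr.length - 1) + 1 := by rw [harr]; simp
    have hs : arr.foldl PySem.Set.add PySem.Set.empty = PySem.Set.ofList arr :=
      (PySem.Set.ofList_eq_foldl arr).symm
    have hc : ∀ w, PySem.Set.contains (PySem.Set.ofList arr) w = arr.contains w := by
      intro w
      have h1 : PySem.Set.contains (PySem.Set.ofList arr) w = (PySem.Set.ofList arr).contains w := rfl
      rw [h1]
      simp [List.contains_eq_mem, PySem.Set.mem_ofList]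
    have hlen : PySem.List.len arr = (arr.length : Int) := by simp [PySem.List.len]
    -- rewrite the program
    show (PySem.List.pyRange 0 (PySem.List.len arr - 1)).foldl (fun result i =>
      (PySem.List.pyRange (i + 1) (PySem.List.len arr)).foldl (fun result j =>
        if PySem.Set.contains (arr.foldl PySem.Set.add PySem.Set.empty)
            (PySem.List.pyGetD arr i 0 * PySem.List.pyGetD arr j 0)
        then result + 1 else result) result) 0 = _
    rw [hs]
    -- inner loops
    have houter : (PySem.List.pyRange 0 (PySem.List.len arr - 1)).foldl (fun result i =>
        (PySem.List.pyRange (i + 1) (PySem.List.len arr)).foldl (fun result j =>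
          if PySem.Set.contains (PySem.Set.ofList arr)
              (PySem.List.pyGetD arr i 0 * PySem.List.pyGetD arr j 0)
          then result + 1 else result) result) 0
        = (PySem.List.pyRange 0 (PySem.List.len arr - 1)).foldl (fun result i =>
            result + (((arr.drop (i + 1).toNat).countP
              (fun y => arr.contains (PySem.List.pyGetD arr i 0 * y)) : Nat) : Int)) 0 := by
      apply PySem.List.foldl_congr_mem
      intro acc i hi
      have hi0 : 0 ≤ i := (PySem.List.mem_pyRange_one.mp hi).1
      rw [PySem.List.foldl_pyRange_pyGetD arr 0
        (f := fun acc y => if PySem.Set.contains (PySem.Set.ofList arr)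
            (PySem.List.pyGetD arr i 0 * y) then acc + 1 else acc) acc (by omega)]
      rw [PySem.List.foldl_if_add_one
        (p := fun y => PySem.Set.contains (PySem.Set.ofList arr) (PySem.List.pyGetD arr i 0 * y))]
      simp only [hc]
    rw [houter]
    rw [PySem.List.foldl_add]
    rw [hlen]
    have hcast : ((arr.length : Int) - 1) = ((arr.length - 1 : Nat) : Int) := by
      rw [hne]; push_cast; ring
    rw [hcast, PySem.List.pyRange_zero_natCast, List.map_map]
    have hmapeq : ((List.range (arr.length - 1)).map
        ((fun i => (((arr.drop (i + 1).toNat).countP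
            (fun y => arr.contains (PySem.List.pyGetD arr i 0 * y)) : Nat) : Int)) ∘ (fun k : Nat => (k : Int))))
        = (List.range (arr.length - 1)).map (fun i =>
            (((arr.drop (i + 1)).countP (fun y => arr.contains (arr.getD i 0 * y)) : Nat) : Int)) := by
      apply List.map_congr_left
      intro i hi
      simp only [Function.comp_apply, PySem.List.pyGetD_natCast]
      have ht : ((i : Int) + 1).toNat = i + 1 := by omega
      rw [ht]
    rw [hmapeq]
    -- extend range (n-1) to range n : the last term is zero
    rw [← pvRangeSum (fun w => arr.contains w) arr]
    conv_rhs => rw [hne, List.range_succ, List.map_append, List.sum_append]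
    have hdrop : List.drop (arr.length - 1 + 1) arr = [] := by rw [← hne]; simp
    simp [hdrop]

lemma pvB_eq (arr : List Int) :
    productpair_alt arr = pvCountPairs (fun x y => arr.contains (x * y)) arr := by
  simp only [productpair_alt]
  rw [PySem.Dict.foldl_insert_getD_add_one_eq_counter, PySem.Dict.keys_counter]
  have h := pvMainLoop arr.length arr le_rfl (PySem.Dict.counter arr) (fun w => arr.contains w) 0
    (fun w => PySem.Dict.contains_counter arr w)
    (fun v _ => PySem.Dict.getD_counter arr v)
  rw [h]
  ring

-- ===== VERDICT (by name: the statement is the Claim_ definition above) =====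
theorem productpair_spec : Claim_equal_productpair := by
  intro arr _
  unfold Spec_productpair
  rw [pvA_eq, pvB_eq]
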